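-- pv_equiv track=rewrite | github.com/maciej88/python1-2022 | src/algo/z10/b.py | signs_list
-- ===== SOURCE A (Python) =====
-- def signs_list(word: str) -> list:
--     start_list = [*word]
--     def_val = 5
--     res = []
--     for i, x in enumerate(start_list):
--         if x == '>':
--             def_val -= 1
--             res.append(def_val)
--         if x == '<':
--             def_val += 1
--             res.append(def_val)
--
--     return res
-- ===== SOURCE B (Python) =====
-- def signs_list(word: str) -> list:
--     # Two-phase, back-to-front: the final counter value is known up front from the
--     # total counts of '<' and '>'; walk the word in reverse emitting values and
--     # undoing each step, then reverse the output.
--     total = 5 + word.count('<') - word.count('>')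
--     out = []
--     for c in reversed(word):
--         if c == '>':
--             out.append(total)
--             total += 1
--         elif c == '<':
--             out.append(total)
--             total -= 1
--     out.reverse()
--     return out
-- ===== Notes on version B (the rewrite author's own statement) =====
-- stated objective: alternative
-- what changed: B first computes the final counter value in closed form from the total '<'/'>' counts, then walks the word BACKWARDS, emitting each running value and undoing its step, and reverses the output - building the result back-to-front instead of A's forward running counter.
import Mathlib
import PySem

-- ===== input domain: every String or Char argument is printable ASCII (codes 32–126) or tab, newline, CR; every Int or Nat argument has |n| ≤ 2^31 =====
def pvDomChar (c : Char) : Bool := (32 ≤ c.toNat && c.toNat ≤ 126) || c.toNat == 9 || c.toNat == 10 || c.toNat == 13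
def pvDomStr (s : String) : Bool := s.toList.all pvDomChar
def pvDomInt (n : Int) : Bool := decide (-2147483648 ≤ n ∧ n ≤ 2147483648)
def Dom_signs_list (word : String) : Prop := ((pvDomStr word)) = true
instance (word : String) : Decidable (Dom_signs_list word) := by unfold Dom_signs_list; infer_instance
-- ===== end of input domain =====

-- B builds the result back-to-front: final counter from total sign counts, then a reverse walk undoing each step (objective: alternative).

-- ===== PORT A =====
-- literal port of A: forward loop, state (def_val, res), both ifs in order
def signs_list (word : String) : List Int :=
  (word.toList.foldl
    (fun (st : Int × List Int) x =>
      let st := if x = '>' then (st.1 - 1, st.2 ++ [st.1 - 1]) else st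
      if x = '<' then (st.1 + 1, st.2 ++ [st.1 + 1]) else st)
    (5, [])).2

-- ===== PORT B =====
-- B: total counts first (str.count on a 1-char needle = List.count, exact), then a
-- reverse walk emitting values and undoing each step, then out.reverse.
def signs_list_alt (word : String) : List Int :=
  let total : Int := 5 + (word.toList.count '<' : Int) - (word.toList.count '>' : Int)
  ((word.toList.reverse).foldl
    (fun (st : Int × List Int) c =>
      if c = '>' then (st.1 + 1, st.2 ++ [st.1])
      else if c = '<' then (st.1 - 1, st.2 ++ [st.1])
      else st)
    (total, [])).2.reverse

-- ===== PRECONDITION & SPEC =====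
def Spec_signs_list (word : String) (out : List Int) : Prop := out = signs_list_alt word
instance (word : String) (out : List Int) : Decidable (Spec_signs_list word out) := by unfold Spec_signs_list; infer_instance

-- ===== CLAIM (what is proved, stated in full; the proofs are below) =====
def Claim_equal_signs_list : Prop := ∀ (word : String), Dom_signs_list word → Spec_signs_list word (signs_list word)

-- ===== LEMMAS AND PROOFS =====

-- proof-only helpers: per-char delta and the forward running-value list
def sgnDelta (c : Char) : Int := if c = '>' then -1 else if c = '<' then 1 else 0

def sgnVals (v : Int) : List Char → List Int
  | [] => []
  | c :: cs =>
    if c = '>' ∨ c = '<' then (v + sgnDelta c) :: sgnVals (v + sgnDelta c) cs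
    else sgnVals v cs

theorem sgnA (cs : List Char) (v : Int) (acc : List Int) :
    (cs.foldl
      (fun (st : Int × List Int) x =>
        let st := if x = '>' then (st.1 - 1, st.2 ++ [st.1 - 1]) else st
        if x = '<' then (st.1 + 1, st.2 ++ [st.1 + 1]) else st)
      (v, acc)).2 = acc ++ sgnVals v cs := by
  induction cs generalizing v acc with
  | nil => simp [sgnVals]
  | cons c cs ih =>
    rw [List.foldl_cons]
    by_cases h1 : c = '>'
    · subst h1
      have h2 : ¬ ('>' : Char) = '<' := by decide
      simp only [if_neg h2, ih, sgnVals, sgnDelta, true_or, if_true]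
      simp [sub_eq_add_neg]
    · by_cases h2 : c = '<'
      · subst h2
        simp only [if_neg h1, ih, sgnVals, sgnDelta, or_true, if_true]
        simp
      · simp only [if_neg h1, if_neg h2, ih, sgnVals]
        simp [h1, h2]

theorem sgnCount (cs : List Char) :
    5 + (cs.count '<' : Int) - (cs.count '>' : Int)
      = 5 + (cs.map sgnDelta).sum := by
  induction cs with
  | nil => simp
  | cons c cs ih =>
    rw [List.count_cons, List.count_cons, List.map_cons, List.sum_cons]
    by_cases h1 : c = '>'
    · subst h1
      have b1 : (('>' : Char) == '<') = false := by decide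
      have b2 : (('>' : Char) == '>') = true := by decide
      rw [b1, b2, if_neg Bool.false_ne_true, if_pos rfl]
      have hd : sgnDelta '>' = -1 := by decide
      rw [hd]; push_cast; omega
    · by_cases h2 : c = '<'
      · subst h2
        have b1 : (('<' : Char) == '<') = true := by decide
        have b2 : (('<' : Char) == '>') = false := by decide
        rw [b1, b2, if_pos rfl, if_neg Bool.false_ne_true]
        have hd : sgnDelta '<' = 1 := by decide
        rw [hd]; push_cast; omega
      · have b1 : (c == '<') = false := by simp [h2]
        have b2 : (c == '>') = false := by simp [h1]
        rw [b1, b2]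
        have hd : sgnDelta c = 0 := by simp [sgnDelta, h1, h2]
        rw [hd]; push_cast; omega

theorem sgnB (cs : List Char) (v : Int) :
    cs.foldr
      (fun c (st : Int × List Int) =>
        if c = '>' then (st.1 + 1, st.2 ++ [st.1])
        else if c = '<' then (st.1 - 1, st.2 ++ [st.1])
        else st)
      (v + (cs.map sgnDelta).sum, []) = (v, (sgnVals v cs).reverse) := by
  induction cs generalizing v with
  | nil => simp [sgnVals]
  | cons c cs ih =>
    have hinit : v + ((c :: cs).map sgnDelta).sum
        = (v + sgnDelta c) + (cs.map sgnDelta).sum := by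
      simp [List.map_cons]; ring
    rw [List.foldr_cons, hinit, ih (v + sgnDelta c)]
    by_cases h1 : c = '>'
    · subst h1
      have h2 : ¬ ('>' : Char) = '<' := by decide
      simp [sgnVals, sgnDelta, h2]
    · by_cases h2 : c = '<'
      · subst h2
        simp [sgnVals, sgnDelta, h1]
      · simp [sgnVals, sgnDelta, h1, h2]

-- ===== VERDICT (by name: the statement is the Claim_ definition above) =====
theorem signs_list_spec : Claim_equal_signs_list := by
  intro word _
  unfold Spec_signs_list signs_list signs_list_alt
  rw [sgnA word.toList 5 [], List.nil_append]
  simp only [List.foldl_reverse, sgnCount word.toList]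
  rw [sgnB word.toList 5]
  simp
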